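-- pv_equiv track=rewrite | github.com/PogChan/PredMonitor | ingest/ingest_utils.py | extract_company_match
-- ===== SOURCE A (Python) =====
-- from typing import Any, Dict, Iterable, List, Optional, Sequence, Tuple, Union
--
-- def extract_company_match(text: str, company_terms: Sequence[str]) -> Optional[str]:
--     if not company_terms or not text:
--         return None
--     lowered = text.lower()
--     for term in company_terms:
--         if term in lowered:
--             return term
--     return None
-- ===== SOURCE B (Python) =====
-- def extract_company_match(text, company_terms):
--     if not company_terms or not text:
--         return None
--     lowered = text.lower()
--     n = len(lowered)
--     subs_by_len = {}  # term length -> set of all substrings of lowered of that length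
--     for term in company_terms:
--         L = len(term)
--         if L not in subs_by_len:
--             subs_by_len[L] = {lowered[i:i + L] for i in range(n - L + 1)}
--         if term in subs_by_len[L]:
--             return term
--     return None
-- ===== Notes on version B (the rewrite author's own statement) =====
-- stated objective: alternative
-- what changed: B lazily builds a hash index of the text (for each term length, the set of all substrings of the lowered text of that length) and tests each term by set membership, instead of A's per-term substring search over the whole text.
import Mathlib
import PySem

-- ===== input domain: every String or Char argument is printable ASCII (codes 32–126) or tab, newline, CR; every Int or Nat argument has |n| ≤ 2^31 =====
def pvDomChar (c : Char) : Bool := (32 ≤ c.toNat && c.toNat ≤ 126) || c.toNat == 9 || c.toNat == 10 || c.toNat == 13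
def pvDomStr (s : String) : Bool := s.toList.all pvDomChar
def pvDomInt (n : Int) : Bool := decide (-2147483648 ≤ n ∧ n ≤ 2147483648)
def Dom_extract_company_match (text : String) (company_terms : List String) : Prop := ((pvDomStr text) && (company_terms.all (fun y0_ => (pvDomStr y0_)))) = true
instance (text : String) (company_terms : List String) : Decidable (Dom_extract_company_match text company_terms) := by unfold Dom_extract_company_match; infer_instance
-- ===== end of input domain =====

-- B lazily builds, per term length, the set of all substrings of the lowered text of that length,
-- and tests each term by set membership instead of A's per-term substring scan (alternative; no speed claim).

-- ===== PORT A =====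
-- A's loop: return the first term of company_terms that is a substring of text.lower()
def pvGoA (lowered : String) : List String → Option String
  | [] => none
  | term :: rest => if PySem.Str.isIn term lowered then some term else pvGoA lowered rest

def extract_company_match (text : String) (company_terms : List String) : Option String :=
  if company_terms.isEmpty || text.toList.isEmpty then none
  else
    let lowered := PySem.Str.lower text
    pvGoA lowered company_terms

-- ===== PORT B =====
-- '{lowered[i:i+L] for i in range(n - L + 1)}': the set of all substrings of lowered of length L
def pvSubs (lowered : String) (L : Int) : PySem.Set String :=
  PySem.Set.ofList ((PySem.List.pyRange 0 (PySem.Str.len lowered - L + 1) 1).map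
    (fun i => PySem.Str.slice lowered (some i) (some (i + L))))

-- B's loop: lazily build subs_by_len and return the first term found in its length's substring set
-- ('subs_by_len[L]' is read as getD with a default: the key is always present at that point, so this is exact)
def pvGoB (lowered : String) : PySem.Dict Int (PySem.Set String) → List String → Option String
  | _, [] => none
  | d, term :: rest =>
    let L := PySem.Str.len term
    let d' := if d.contains L then d else d.insert L (pvSubs lowered L)
    if (d'.getD L PySem.Set.empty).contains term then some term else pvGoB lowered d' rest

def extract_company_match_alt (text : String) (company_terms : List String) : Option String :=
  if company_terms.isEmpty || text.toList.isEmpty then none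
  else
    let lowered := PySem.Str.lower text
    pvGoB lowered PySem.Dict.empty company_terms

-- ===== PRECONDITION & SPEC =====
def Spec_extract_company_match (text : String) (company_terms : List String) (out : Option String) : Prop := out = extract_company_match_alt text company_terms
instance (text : String) (company_terms : List String) (out : Option String) : Decidable (Spec_extract_company_match text company_terms out) := by unfold Spec_extract_company_match; infer_instance

-- ===== CLAIM (what is proved, stated in full; the proofs are below) =====
def Claim_equal_extract_company_match : Prop := ∀ (text : String) (company_terms : List String), Dom_extract_company_match text company_terms → Spec_extract_company_match text company_terms (extract_company_match text company_terms)

-- ===== LEMMAS AND PROOFS =====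

-- membership in the length-L substring set is exactly Python's 'term in lowered'
lemma pvSubs_contains (lowered t : String) :
    (pvSubs lowered (PySem.Str.len t)).contains t = PySem.Str.isIn t lowered := by
  rw [Bool.eq_iff_iff]
  unfold pvSubs
  rw [PySem.Set.contains_iff, PySem.Set.mem_ofList, List.mem_map]
  have hlen : PySem.Str.len t = (t.toList.length : Int) := by simp [pysem]
  have hlen2 : PySem.Str.len lowered = (lowered.toList.length : Int) := by simp [pysem]
  have hin : PySem.Str.isIn t lowered = true ↔ PySem.Chars.isIn t.toList lowered.toList = true := by
    simp [pysem]
  rw [hin, ← PySem.Chars.exists_prefix_drop_iff_isIn]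
  constructor
  · rintro ⟨i, hmem, heq⟩
    rw [PySem.List.mem_pyRange_one] at hmem
    obtain ⟨h0, hlt⟩ := hmem
    refine ⟨i.toNat, ?_⟩
    have hi : i = (i.toNat : Int) := (Int.toNat_of_nonneg h0).symm
    have : (PySem.Str.slice lowered (some i) (some (i + PySem.Str.len t))).toList
        = (lowered.toList.drop i.toNat).take t.toList.length := by
      rw [hi, hlen]
      simp only [PySem.Str.toList_slice, PySem.Chars.slice_eq_listSlice,
        PySem.List.slice_natCast_add, Int.toNat_natCast]
    rw [← heq, this]
    exact List.take_prefix _ _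
  · rintro ⟨j, hp⟩
    have hj' : t.toList <+: lowered.toList.drop (min j lowered.toList.length) := by
      rcases le_or_gt j lowered.toList.length with h | h
      · rwa [min_eq_left h]
      · rw [min_eq_right (le_of_lt h)]
        have : lowered.toList.drop j = [] := List.drop_eq_nil_of_le (le_of_lt h)
        rw [this] at hp
        rw [List.prefix_nil.mp hp]
        exact List.nil_prefix
    set j' := min j lowered.toList.length with hj'def
    have hLle : t.toList.length ≤ lowered.toList.length - j' := by
      have := hj'.length_le
      simpa using this
    have hj'le : j' ≤ lowered.toList.length := min_le_right _ _
    refine ⟨(j' : Int), ?_, ?_⟩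
    · rw [PySem.List.mem_pyRange_one, hlen, hlen2]
      constructor
      · exact Int.natCast_nonneg _
      · omega
    · apply String.toList_inj.mp
      rw [hlen]
      simp only [PySem.Str.toList_slice, PySem.Chars.slice_eq_listSlice,
        PySem.List.slice_natCast_add]
      exact (List.prefix_iff_eq_take.mp hj').symm

-- loop invariant: every key L present in subs_by_len holds the substring set for length L;
-- under it, B's loop returns exactly what A's loop returns
lemma pvGoB_eq_pvGoA (lowered : String) (ts : List String) :
    ∀ d : PySem.Dict Int (PySem.Set String),
      (∀ L, d.contains L = true → d.getD L PySem.Set.empty = pvSubs lowered L) →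
      pvGoB lowered d ts = pvGoA lowered ts := by
  induction ts with
  | nil => intro d _; rfl
  | cons t ts ih =>
    intro d hinv
    by_cases hc : d.contains (PySem.Str.len t) = true
    · have hset : d.getD (PySem.Str.len t) PySem.Set.empty = pvSubs lowered (PySem.Str.len t) :=
        hinv _ hc
      simp only [pvGoB, hc, if_pos, hset, pvSubs_contains, pvGoA, ih d hinv]
    · have hinv' : ∀ L,
          (d.insert (PySem.Str.len t) (pvSubs lowered (PySem.Str.len t))).contains L = true →
          (d.insert (PySem.Str.len t) (pvSubs lowered (PySem.Str.len t))).getD L PySem.Set.empty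
            = pvSubs lowered L := by
        intro L hL
        by_cases hLt : L = PySem.Str.len t
        · subst hLt
          exact PySem.Dict.getD_insert_self d _ _ _
        · rw [PySem.Dict.contains_insert] at hL
          have hL' : d.contains L = true := by
            rcases (Bool.or_eq_true _ _).mp hL with h | h
            · exact absurd (beq_iff_eq.mp h) hLt
            · exact h
          rw [PySem.Dict.getD_insert_of_ne]
          · exact hinv _ hL'
          · exact hLt
      simp only [pvGoB, hc, Bool.false_eq_true, if_neg, not_false_eq_true, pvGoA]
      rw [show ((d.insert (PySem.Str.len t) (pvSubs lowered (PySem.Str.len t))).getD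
            (PySem.Str.len t) PySem.Set.empty) = pvSubs lowered (PySem.Str.len t) by simp [pysem]]
      rw [pvSubs_contains, ih _ hinv']

-- ===== VERDICT (by name: the statement is the Claim_ definition above) =====
theorem extract_company_match_spec : Claim_equal_extract_company_match := by
  intro text terms _
  unfold Spec_extract_company_match extract_company_match extract_company_match_alt
  by_cases hg : (terms.isEmpty || text.toList.isEmpty) = true
  · rw [if_pos hg, if_pos hg]
  · rw [if_neg hg, if_neg hg]
    exact (pvGoB_eq_pvGoA _ _ _ (fun L hL => by simp [pysem] at hL)).symm
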